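-- pv_equiv track=rewrite | github.com/LiamP921/Project-Euler | Euler 1-50/Euler 31-40/euler_36.py | _make_base_2_palindrome
-- ===== SOURCE A (Python) =====
-- def _make_base_2_palindrome(n, odd_length):
--     result = n
--     if odd_length:
--         """ remove n's LSB, ensuring that the enerated palindrome's
--         length is odd. """
--         n >>= 1
--     while n > 0:
--         """ mirror n and add its LSB to result. """
--         result = (result << 1) + (n & 1)
--         n >>= 1
--     return result
-- ===== SOURCE B (Python) =====
-- def _make_base_2_palindrome(n, odd_length):
--     s = bin(n)[2:]
--     mirror = s[-2::-1] if odd_length else s[::-1]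
--     return int(s + mirror, 2)
-- ===== Notes on version B (the rewrite author's own statement) =====
-- stated objective: idiomatic
-- what changed: B builds the binary string bin(n)[2:], appends its reversal (dropping the last bit first when odd_length) and parses the palindrome back with int(.,2), instead of A's shift-and-mask integer loop.
-- outside the precondition, e.g. on _make_base_2_palindrome(-3, False): A returns -3, B raises ValueError
import Mathlib
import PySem

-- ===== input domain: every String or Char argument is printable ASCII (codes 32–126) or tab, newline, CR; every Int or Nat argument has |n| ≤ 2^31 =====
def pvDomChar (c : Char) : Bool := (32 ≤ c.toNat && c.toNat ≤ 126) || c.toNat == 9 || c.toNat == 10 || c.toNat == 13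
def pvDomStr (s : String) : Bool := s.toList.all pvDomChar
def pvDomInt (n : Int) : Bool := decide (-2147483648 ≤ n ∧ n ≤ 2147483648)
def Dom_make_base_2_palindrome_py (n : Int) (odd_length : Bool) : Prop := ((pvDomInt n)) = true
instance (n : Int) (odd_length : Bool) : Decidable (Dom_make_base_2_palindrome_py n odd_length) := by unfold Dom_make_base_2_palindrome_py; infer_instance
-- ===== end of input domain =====

-- B builds the binary string of n, appends its (tail-)reversal and parses the palindrome back,
-- instead of A's shift-and-mask integer accumulator loop (objective: idiomatic; same cost).


-- ===== PORT A =====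
-- the 'while n > 0' loop: result = (result << 1) + (n & 1); n >>= 1
def pvALoop (n result : Int) : Int :=
  if h : n > 0 then
    pvALoop (PySem.Int.floordiv n 2) (result * 2 + PySem.Int.mod n 2)
  else result
termination_by n.toNat
decreasing_by
  have h2 : PySem.Int.floordiv n 2 = n / 2 := by
    simp [PySem.Int.floordiv, Int.fdiv_eq_ediv]
  rw [h2]; omega

def make_base_2_palindrome_py (n : Int) (odd_length : Bool) : Int :=
  let result := n
  let n := if odd_length then PySem.Int.floordiv n 2 else n   -- n >>= 1
  pvALoop n result

-- ===== PORT B =====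
-- bin(m)[2:] for m ≥ 0, as a list of '0'/'1' chars (hand port of bin(); exact for n ≥ 0,
-- which is all of Pre_; Source B raises on negative n)
def pvBinNat (m : Nat) : List Char :=
  if m < 2 then [if m = 1 then '1' else '0']
  else pvBinNat (m / 2) ++ [if m % 2 = 1 then '1' else '0']

-- int(p, 2) on a list of '0'/'1' chars (hand port; exact on such strings)
def pvVal2 (r : Int) (p : List Char) : Int :=
  p.foldl (fun a c => a * 2 + (if c = '1' then 1 else 0)) r

def make_base_2_palindrome_py_alt (n : Int) (odd_length : Bool) : Int :=
  let s := pvBinNat n.toNat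
  -- s[-2::-1] = (s without its last char) reversed; s[::-1] = s reversed (exact step -1 slices)
  let mirror := if odd_length then s.dropLast.reverse else s.reverse
  pvVal2 0 (s ++ mirror)

-- ===== PRECONDITION & SPEC =====
-- Pre_ excludes negative n: there Python A's 'while n > 0' never runs and A returns n itself
-- (an artefact of arithmetic shifts), while B's bin-string parse raises ValueError.
def Pre_make_base_2_palindrome_py (n : Int) (odd_length : Bool) : Prop := 0 ≤ n
instance (n : Int) (odd_length : Bool) : Decidable (Pre_make_base_2_palindrome_py n odd_length) := by unfold Pre_make_base_2_palindrome_py; infer_instance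
def pvWitness_make_base_2_palindrome_py : Int × Bool := (6, true)
def Spec_make_base_2_palindrome_py (n : Int) (odd_length : Bool) (out : Int) : Prop := out = make_base_2_palindrome_py_alt n odd_length
instance (n : Int) (odd_length : Bool) (out : Int) : Decidable (Spec_make_base_2_palindrome_py n odd_length out) := by unfold Spec_make_base_2_palindrome_py; infer_instance

-- ===== CLAIM (what is proved, stated in full; the proofs are below) =====
def Claim_equal_make_base_2_palindrome_py : Prop := ∀ (n : Int) (odd_length : Bool), Dom_make_base_2_palindrome_py n odd_length → Pre_make_base_2_palindrome_py n odd_length → Spec_make_base_2_palindrome_py n odd_length (make_base_2_palindrome_py n odd_length)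

-- ===== LEMMAS AND PROOFS =====

-- bit-reversal bit list of m, LSB first
def pvRevBits (m : Nat) : List Char :=
  if m = 0 then [] else (if m % 2 = 1 then '1' else '0') :: pvRevBits (m / 2)

theorem pvVal2_append (r : Int) (xs ys : List Char) :
    pvVal2 r (xs ++ ys) = pvVal2 (pvVal2 r xs) ys := by
  simp [pvVal2, List.foldl_append]

theorem pvVal2_cons (r : Int) (c : Char) (xs : List Char) :
    pvVal2 r (c :: xs) = pvVal2 (r * 2 + (if c = '1' then 1 else 0)) xs := by
  simp [pvVal2]

-- parsing bin(m) back gives m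
theorem pvVal2_binNat (m : Nat) (r : Int) : pvVal2 r (pvBinNat m) = r * 2 ^ (pvBinNat m).length + m := by
  induction m using Nat.strong_induction_on generalizing r with
  | _ m ih =>
    rw [pvBinNat]
    by_cases h : m < 2
    · interval_cases m <;> simp [pvVal2]
    · simp only [if_neg h, pvVal2_append]
      rw [ih (m / 2) (by omega) r]
      have hm2 : m % 2 = 1 ∨ m % 2 = 0 := by omega
      rcases hm2 with h1 | h1 <;> simp [pvVal2, h1, List.length_append, pow_succ] <;> ring_nf <;> omega

-- A's loop computes appending the reversed bits
theorem pvALoop_eq (m : Nat) (r : Int) : pvALoop (m : Int) r = pvVal2 r (pvRevBits m) := by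
  induction m using Nat.strong_induction_on generalizing r with
  | _ m ih =>
    rw [pvALoop, pvRevBits]
    by_cases h : m = 0
    · simp [h, pvVal2]
    · have hpos : (0 : Int) < (m : Int) := by exact_mod_cast Nat.pos_of_ne_zero h
      have hfd : PySem.Int.floordiv (m : Int) 2 = ((m / 2 : Nat) : Int) := by
        simp only [PySem.Int.floordiv]
        rw [Int.fdiv_eq_ediv]
        omega
      have hmod : PySem.Int.mod (m : Int) 2 = ((m % 2 : Nat) : Int) := by
        simp only [PySem.Int.mod]
        rw [Int.fmod_eq_emod]
        omega
      rw [dif_pos hpos, hfd, hmod, ih (m / 2) (by omega)]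
      have hm2 : m % 2 = 1 ∨ m % 2 = 0 := by omega
      rcases hm2 with h1 | h1 <;> simp [h, h1, pvVal2_cons]

-- reversing bin(m) gives the LSB-first bit list (m ≥ 1)
theorem pvBinNat_reverse (m : Nat) (hm : 1 ≤ m) : (pvBinNat m).reverse = pvRevBits m := by
  induction m using Nat.strong_induction_on with
  | _ m ih =>
    by_cases h : m < 2
    · have h1 : m = 1 := by omega
      subst h1
      have h0 : pvRevBits 0 = [] := by rw [pvRevBits]; norm_num
      have h2 : pvRevBits 1 = ['1'] := by rw [pvRevBits]; norm_num [h0]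
      rw [pvBinNat, h2]
      norm_num
    · rw [pvBinNat, if_neg h, List.reverse_append,
        ih (m / 2) (by omega) (by omega)]
      conv_rhs => rw [pvRevBits]
      rw [if_neg (show ¬ m = 0 by omega)]
      simp

theorem pvBinNat_dropLast_reverse (m : Nat) (hm : 1 ≤ m) :
    (pvBinNat m).dropLast.reverse = pvRevBits (m / 2) := by
  rw [pvBinNat]
  by_cases h : m < 2
  · have : m = 1 := by omega
    subst this
    simp [pvRevBits]
  · rw [if_neg h]
    rw [List.dropLast_concat]
    exact pvBinNat_reverse (m / 2) (by omega)

-- ===== VERDICT (by name: the statement is the Claim_ definition above) =====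
theorem make_base_2_palindrome_py_spec : Claim_equal_make_base_2_palindrome_py := by
  intro n odd_length _ hpre
  unfold Pre_make_base_2_palindrome_py at hpre
  unfold Spec_make_base_2_palindrome_py make_base_2_palindrome_py make_base_2_palindrome_py_alt
  obtain ⟨m, rfl⟩ : ∃ m : Nat, n = (m : Int) := ⟨n.toNat, by omega⟩
  simp only [Int.toNat_natCast]
  by_cases hm0 : m = 0
  · subst hm0
    have hL : pvALoop 0 0 = 0 := by rw [pvALoop]; norm_num
    have hf : PySem.Int.floordiv 0 2 = 0 := by simp [PySem.Int.floordiv]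
    have hB : pvBinNat 0 = ['0'] := by rw [pvBinNat]; norm_num
    cases odd_length <;>
      simp [hL, hf, hB, pvVal2, show ((0 : Nat) : Int) = 0 from rfl]
  · have hm1 : 1 ≤ m := Nat.pos_of_ne_zero hm0
    have hval : pvVal2 0 (pvBinNat m) = (m : Int) := by
      have := pvVal2_binNat m 0
      simpa using this
    cases odd_length with
    | false =>
      simp only [Bool.false_eq_true, if_false]
      rw [pvALoop_eq m (m : Int), pvVal2_append, hval, ← pvBinNat_reverse m hm1]
    | true =>
      simp only [if_true]
      have hfd : PySem.Int.floordiv (m : Int) 2 = ((m / 2 : Nat) : Int) := by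
        simp only [PySem.Int.floordiv]
        rw [Int.fdiv_eq_ediv]
        omega
      rw [hfd, pvALoop_eq (m / 2) (m : Int), pvVal2_append, hval,
        ← pvBinNat_dropLast_reverse m hm1]
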